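-- pv_equiv track=rewrite | github.com/Nyasa-Roy/advent-of-code | 2025/python/day 9.py | largest_rectangle
-- ===== SOURCE A (Python) =====
-- from itertools import combinations
--
-- def largest_rectangle(red, allowed):
--     best = 0
--     for (x1, y1), (x2, y2) in combinations(red, 2):
--         minx, maxx = sorted([x1, x2])
--         miny, maxy = sorted([y1, y2])
--
--         valid = True
--         for x in range(minx, maxx + 1):
--             for y in range(miny, maxy + 1):
--                 if (x, y) not in allowed:
--                     valid = False
--                     break
--             if not valid:
--                 break
--
--         if valid:
--             area = (maxx - minx + 1) * (maxy - miny + 1)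
--             best = max(best, area)
--
--     return best
-- ===== SOURCE B (Python) =====
-- def largest_rectangle(red, allowed):
--     # Corners of a fully-allowed rectangle are themselves allowed, so only red
--     # points inside the allowed set can form one; a rectangle is fully allowed
--     # iff the number of distinct allowed points inside it equals its area, and
--     # rectangles larger than the whole allowed set or not beating the current
--     # best are rejected without any scan.
--     pts = set(allowed)
--     best = 0
--     rest = [p for p in red if p in pts]
--     while rest:
--         x1, y1 = rest.pop(0)
--         for x2, y2 in rest:
--             lox, hix = (x1, x2) if x1 <= x2 else (x2, x1)
--             loy, hiy = (y1, y2) if y1 <= y2 else (y2, y1)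
--             area = (hix - lox + 1) * (hiy - loy + 1)
--             if best < area <= len(pts):
--                 inside = sum(1 for px, py in pts
--                              if lox <= px <= hix and loy <= py <= hiy)
--                 if inside == area:
--                     best = area
--     return best
-- ===== Notes on version B (the rewrite author's own statement) =====
-- stated objective: faster
-- what changed: B first discards red points that are not themselves allowed (a fully-allowed rectangle's corners must be allowed), and replaces A's cell-by-cell scan of each candidate rectangle with a distinct-allowed-point count compared to the area, pruning rectangles larger than the allowed set or not beating the current best without any scan.
import Mathlib
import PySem

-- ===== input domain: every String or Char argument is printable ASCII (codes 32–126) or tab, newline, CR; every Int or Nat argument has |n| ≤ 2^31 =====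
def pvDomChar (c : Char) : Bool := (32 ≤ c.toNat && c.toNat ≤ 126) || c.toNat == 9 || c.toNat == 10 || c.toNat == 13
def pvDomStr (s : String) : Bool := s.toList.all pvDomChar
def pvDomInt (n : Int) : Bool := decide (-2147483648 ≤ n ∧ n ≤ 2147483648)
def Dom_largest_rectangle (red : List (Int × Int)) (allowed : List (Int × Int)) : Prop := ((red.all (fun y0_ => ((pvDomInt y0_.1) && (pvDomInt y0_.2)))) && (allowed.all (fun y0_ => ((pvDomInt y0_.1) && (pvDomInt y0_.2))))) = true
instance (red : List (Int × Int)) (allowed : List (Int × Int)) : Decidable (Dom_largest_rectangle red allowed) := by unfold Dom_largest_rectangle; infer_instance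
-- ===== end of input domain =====

-- B keeps only red points that are themselves allowed (a valid rectangle's corners must be) and replaces A's per-rectangle cell-by-cell scan by a distinct-allowed-point count compared to the area, with prunes that skip rectangles larger than the allowed set or not beating the current best.


-- ===== PORT A =====
-- combinations(red, 2) in iteration order
def comb2 {a : Type} (l : List a) : List (a × a) :=
  match l with
  | [] => []
  | p :: t => t.map (fun q => (p, q)) ++ comb2 t

-- `for y in range(...): if (x, y) not in allowed: valid = False; break` — the break
-- is the early `false` exit; the fuel is the number of remaining iterations
def loopY (allowed : List (Int × Int)) (x : Int) : Nat → Int → Bool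
  | 0, _ => true
  | n + 1, y => if (x, y) ∈ allowed then loopY allowed x n (y + 1) else false

-- the outer `for x in range(...)` with its `if not valid: break`
def loopX (allowed : List (Int × Int)) (miny maxy : Int) : Nat → Int → Bool
  | 0, _ => true
  | n + 1, x =>
    if loopY allowed x (maxy + 1 - miny).toNat miny
    then loopX allowed miny maxy n (x + 1) else false

def largest_rectangle (red : List (Int × Int)) (allowed : List (Int × Int)) : Int :=
  (comb2 red).foldl (fun best pq =>
    let x1 := pq.1.1
    let y1 := pq.1.2
    let x2 := pq.2.1
    let y2 := pq.2.2
    let minx := min x1 x2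
    let maxx := max x1 x2
    let miny := min y1 y2
    let maxy := max y1 y2
    let valid := loopX allowed miny maxy (maxx + 1 - minx).toNat minx
    if valid then max best ((maxx - minx + 1) * (maxy - miny + 1)) else best) 0

-- ===== PORT B =====
-- body of the inner `for x2, y2 in rest` loop of Source B
def altInner (pts : PySem.Set (Int × Int)) (x1 y1 : Int)
    (rest : List (Int × Int)) (best : Int) : Int :=
  rest.foldl (fun best q =>
    let x2 := q.1
    let y2 := q.2
    let lox := if x1 ≤ x2 then x1 else x2
    let hix := if x1 ≤ x2 then x2 else x1
    let loy := if y1 ≤ y2 then y1 else y2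
    let hiy := if y1 ≤ y2 then y2 else y1
    let area := (hix - lox + 1) * (hiy - loy + 1)
    if best < area ∧ area ≤ (pts.length : Int) then
      -- sum(1 for px, py in pts if ...) over the set of allowed points
      let inside : Int := pts.countP (fun p =>
        lox ≤ p.1 && p.1 ≤ hix && loy ≤ p.2 && p.2 ≤ hiy)
      if inside = area then area else best
    else best) best

-- the `while rest:` loop popping the head each round
def altLoop (pts : PySem.Set (Int × Int)) : List (Int × Int) → Int → Int
  | [], best => best
  | p :: rest, best => altLoop pts rest (altInner pts p.1 p.2 rest best)

def largest_rectangle_alt (red : List (Int × Int)) (allowed : List (Int × Int)) : Int :=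
  let pts := PySem.Set.ofList allowed
  -- [p for p in red if p in pts]
  altLoop pts (red.filter (fun p => decide (p ∈ pts))) 0

-- ===== PRECONDITION & SPEC =====
def Spec_largest_rectangle (red : List (Int × Int)) (allowed : List (Int × Int)) (out : Int) : Prop := out = largest_rectangle_alt red allowed
instance (red : List (Int × Int)) (allowed : List (Int × Int)) (out : Int) : Decidable (Spec_largest_rectangle red allowed out) := by unfold Spec_largest_rectangle; infer_instance

-- ===== CLAIM (what is proved, stated in full; the proofs are below) =====
def Claim_equal_largest_rectangle : Prop := ∀ (red : List (Int × Int)) (allowed : List (Int × Int)), Dom_largest_rectangle red allowed → Spec_largest_rectangle red allowed (largest_rectangle red allowed)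

-- ===== LEMMAS AND PROOFS =====

-- the inner row scan visits exactly the cells y, y+1, …, y+n-1
theorem loopY_iff (allowed : List (Int × Int)) (x : Int) :
    ∀ (n : Nat) (y : Int),
      loopY allowed x n y = true ↔ ∀ z : Int, y ≤ z → z < y + n → (x, z) ∈ allowed
  | 0, y => by
    constructor
    · intro _ z h1 h2
      omega
    · intro _
      rfl
  | n + 1, y => by
    rw [loopY]
    by_cases hm : (x, y) ∈ allowed
    · rw [if_pos hm, loopY_iff allowed x n (y + 1)]
      constructor
      · intro h z h1 h2
        by_cases hz : z = y
        · exact hz ▸ hm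
        · exact h z (by omega) (by omega)
      · intro h z h1 h2
        exact h z (by omega) (by omega)
    · rw [if_neg hm]
      constructor
      · intro h
        exact absurd h (by simp)
      · intro h
        exact absurd (h y le_rfl (by omega)) hm

-- the short-circuiting nested scan of A tests exactly "every cell of the rectangle is allowed"
theorem valid_iff (allowed : List (Int × Int)) (lox hix loy hiy : Int) (hy : loy ≤ hiy) :
    ∀ (n : Nat) (x0 : Int),
      loopX allowed loy hiy n x0 = true
      ↔ (∀ x y : Int, x0 ≤ x → x < x0 + n → loy ≤ y → y ≤ hiy → (x, y) ∈ allowed)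
  | 0, x0 => by
    constructor
    · intro _ x y h1 h2
      omega
    · intro _
      rfl
  | n + 1, x0 => by
    rw [loopX]
    by_cases hrow : loopY allowed x0 (hiy + 1 - loy).toNat loy = true
    · rw [if_pos hrow, valid_iff allowed lox hix loy hiy hy n (x0 + 1)]
      rw [loopY_iff] at hrow
      constructor
      · intro h x y h1 h2 h3 h4
        by_cases hx0 : x = x0
        · exact hx0 ▸ hrow y h3 (by omega)
        · exact h x y (by omega) (by omega) h3 h4
      · intro h x y h1 h2 h3 h4
        exact h x y (by omega) (by omega) h3 h4
    · rw [if_neg (by simpa using hrow)]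
      constructor
      · intro h
        exact absurd h (by simp)
      · intro h
        exfalso
        apply hrow
        rw [loopY_iff]
        intro z h1 h2
        exact h x0 z le_rfl (by omega) h1 (by omega)

-- B's distinct-point count equals the area iff every cell of the rectangle is allowed
theorem count_iff (allowed : List (Int × Int)) (lox hix loy hiy : Int)
    (hx : lox ≤ hix) (hy : loy ≤ hiy) :
    (((PySem.Set.ofList allowed).countP
        (fun p => lox ≤ p.1 && p.1 ≤ hix && loy ≤ p.2 && p.2 ≤ hiy) : Int)
      = (hix - lox + 1) * (hiy - loy + 1))
    ↔ (∀ x y : Int, lox ≤ x → x ≤ hix → loy ≤ y → y ≤ hiy → (x, y) ∈ allowed) := by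
  set pred : Int × Int → Bool :=
    (fun p => lox ≤ p.1 && p.1 ≤ hix && loy ≤ p.2 && p.2 ≤ hiy) with hpred
  set S : List (Int × Int) := (PySem.Set.ofList allowed).filter pred with hS
  have hcount : (PySem.Set.ofList allowed).countP pred = S.length :=
    List.countP_eq_length_filter
  have hnodupS : S.Nodup := (PySem.Set.nodup_ofList allowed).filter _
  have hcardS : S.toFinset.card = S.length := List.toFinset_card_of_nodup hnodupS
  set F : Finset (Int × Int) := Finset.Icc lox hix ×ˢ Finset.Icc loy hiy with hF
  have hmemF : ∀ p : Int × Int, p ∈ F ↔ (lox ≤ p.1 ∧ p.1 ≤ hix) ∧ (loy ≤ p.2 ∧ p.2 ≤ hiy) := by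
    intro p; simp [hF, Finset.mem_product, Finset.mem_Icc]
  have hFcard : (F.card : Int) = (hix - lox + 1) * (hiy - loy + 1) := by
    have : F.card = (hix + 1 - lox).toNat * (hiy + 1 - loy).toNat := by
      simp [hF, Finset.card_product, Int.card_Icc]
    rw [this]
    push_cast
    have h1 : ((hix + 1 - lox).toNat : Int) = hix - lox + 1 := by omega
    have h2 : ((hiy + 1 - loy).toNat : Int) = hiy - loy + 1 := by omega
    rw [h1, h2]
  have hmemS : ∀ p : Int × Int, p ∈ S ↔ p ∈ allowed ∧ pred p = true := by
    intro p
    rw [hS, List.mem_filter, PySem.Set.mem_ofList]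
  have hsub : S.toFinset ⊆ F := by
    intro p hp
    rw [List.mem_toFinset, hmemS] at hp
    rw [hmemF]
    have := hp.2
    rw [hpred] at this
    simp only [Bool.and_eq_true, decide_eq_true_eq] at this
    exact ⟨⟨this.1.1.1, this.1.1.2⟩, ⟨this.1.2, this.2⟩⟩
  constructor
  · intro h x y h1 h2 h3 h4
    have hcards : F.card ≤ S.toFinset.card := by
      have : (S.length : Int) = (F.card : Int) := by
        rw [← hcount]; rw [h, hFcard]
      omega
    have hEq : S.toFinset = F := Finset.eq_of_subset_of_card_le hsub hcards
    have hxy : (x, y) ∈ F := by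
      rw [hmemF]; exact ⟨⟨h1, h2⟩, ⟨h3, h4⟩⟩
    rw [← hEq, List.mem_toFinset, hmemS] at hxy
    exact hxy.1
  · intro h
    have hsub2 : F ⊆ S.toFinset := by
      intro p hp
      rw [hmemF] at hp
      rw [List.mem_toFinset, hmemS]
      refine ⟨?_, ?_⟩
      · have := h p.1 p.2 hp.1.1 hp.1.2 hp.2.1 hp.2.2
        simpa using this
      · rw [hpred]
        simp only [Bool.and_eq_true, decide_eq_true_eq]
        exact ⟨⟨⟨hp.1.1, hp.1.2⟩, hp.2.1⟩, hp.2.2⟩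
    have hEq : S.toFinset = F := Finset.Subset.antisymm hsub hsub2
    rw [hcount, ← hcardS, hEq, hFcard]

-- per-pair: A's update of best equals B's update of best
theorem step_eq (allowed : List (Int × Int)) (best x1 y1 x2 y2 : Int) :
    (if loopX allowed (min y1 y2) (max y1 y2) (max x1 x2 + 1 - min x1 x2).toNat (min x1 x2)
      then max best ((max x1 x2 - min x1 x2 + 1) * (max y1 y2 - min y1 y2 + 1)) else best)
    =
    (let lox := if x1 ≤ x2 then x1 else x2
     let hix := if x1 ≤ x2 then x2 else x1
     let loy := if y1 ≤ y2 then y1 else y2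
     let hiy := if y1 ≤ y2 then y2 else y1
     let area := (hix - lox + 1) * (hiy - loy + 1)
     if best < area ∧ area ≤ ((PySem.Set.ofList allowed).length : Int) then
       (if ((PySem.Set.ofList allowed).countP (fun p =>
              lox ≤ p.1 && p.1 ≤ hix && loy ≤ p.2 && p.2 ≤ hiy) : Int) = area
        then area else best)
     else best) := by
  simp only [← min_def, ← max_def]
  set lox := min x1 x2
  set hix := max x1 x2
  set loy := min y1 y2
  set hiy := max y1 y2
  have hx : lox ≤ hix := min_le_max
  have hy : loy ≤ hiy := min_le_max
  set area := (hix - lox + 1) * (hiy - loy + 1) with harea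
  have hvalid : (loopX allowed loy hiy (hix + 1 - lox).toNat lox = true)
      ↔ (∀ x y : Int, lox ≤ x → x ≤ hix → loy ≤ y → y ≤ hiy → (x, y) ∈ allowed) := by
    rw [valid_iff allowed lox hix loy hiy hy ((hix + 1 - lox).toNat) lox]
    constructor
    · intro h x y h1 h2 h3 h4
      exact h x y h1 (by omega) h3 h4
    · intro h x y h1 h2 h3 h4
      exact h x y h1 (by omega) h3 h4
  have hcle : (((PySem.Set.ofList allowed).countP (fun p =>
      lox ≤ p.1 && p.1 ≤ hix && loy ≤ p.2 && p.2 ≤ hiy) : Int))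
      ≤ ((PySem.Set.ofList allowed).length : Int) := by
    exact_mod_cast List.countP_le_length
  by_cases hval : ∀ x y : Int, lox ≤ x → x ≤ hix → loy ≤ y → y ≤ hiy → (x, y) ∈ allowed
  · have hc := (count_iff allowed lox hix loy hiy hx hy).mpr hval
    rw [if_pos (hvalid.mpr hval)]
    rcases lt_or_ge best area with h | h
    · rw [if_pos ⟨h, by rw [harea, ← hc]; exact hcle⟩, if_pos hc, max_eq_right (le_of_lt h)]
    · rw [if_neg (fun hcond => absurd hcond.1 (not_lt.mpr h)), max_eq_left h]
  · rw [if_neg (fun hc => hval (hvalid.mp hc))]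
    by_cases hcond : best < area ∧ area ≤ ((PySem.Set.ofList allowed).length : Int)
    · rw [if_pos hcond, if_neg (fun hc => hval ((count_iff allowed lox hix loy hiy hx hy).mp hc))]
    · rw [if_neg hcond]

-- A's fold over the pairs headed by p equals B's inner loop over the tail
theorem inner_eq (allowed : List (Int × Int)) (p : Int × Int) (t : List (Int × Int)) (best : Int) :
    (t.map (fun q => (p, q))).foldl (fun best pq =>
      let x1 := pq.1.1
      let y1 := pq.1.2
      let x2 := pq.2.1
      let y2 := pq.2.2
      let minx := min x1 x2
      let maxx := max x1 x2
      let miny := min y1 y2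
      let maxy := max y1 y2
      let valid := loopX allowed miny maxy (maxx + 1 - minx).toNat minx
      if valid then max best ((maxx - minx + 1) * (maxy - miny + 1)) else best) best
    = altInner (PySem.Set.ofList allowed) p.1 p.2 t best := by
  rw [List.foldl_map, altInner]
  congr 1
  funext best q
  exact step_eq allowed best p.1 p.2 q.1 q.2

-- whole loop: A's fold over combinations(red, 2) equals B's while-loop
theorem loop_eq (allowed : List (Int × Int)) :
    ∀ (red : List (Int × Int)) (best : Int),
    (comb2 red).foldl (fun best pq =>
      let x1 := pq.1.1
      let y1 := pq.1.2
      let x2 := pq.2.1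
      let y2 := pq.2.2
      let minx := min x1 x2
      let maxx := max x1 x2
      let miny := min y1 y2
      let maxy := max y1 y2
      let valid := loopX allowed miny maxy (maxx + 1 - minx).toNat minx
      if valid then max best ((maxx - minx + 1) * (maxy - miny + 1)) else best) best
    = altLoop (PySem.Set.ofList allowed) red best
  | [], best => rfl
  | p :: t, best => by
    rw [comb2, List.foldl_append, inner_eq, altLoop]
    exact loop_eq allowed t _

-- a pair one of whose corners is not allowed never changes best in A's loop
theorem step_id (allowed : List (Int × Int)) (best x1 y1 x2 y2 : Int)
    (h : (x1, y1) ∉ allowed ∨ (x2, y2) ∉ allowed) :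
    (if loopX allowed (min y1 y2) (max y1 y2) (max x1 x2 + 1 - min x1 x2).toNat (min x1 x2)
     then max best ((max x1 x2 - min x1 x2 + 1) * (max y1 y2 - min y1 y2 + 1)) else best)
    = best := by
  rw [if_neg]
  intro hc
  have hall := (valid_iff allowed (min x1 x2) (max x1 x2) (min y1 y2) (max y1 y2)
    min_le_max ((max x1 x2 + 1 - min x1 x2).toNat) (min x1 x2)).mp hc
  have hx1 : min x1 x2 ≤ x1 := min_le_left _ _
  have hx2 : min x1 x2 ≤ x2 := min_le_right _ _
  have hux1 : x1 ≤ max x1 x2 := le_max_left _ _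
  have hux2 : x2 ≤ max x1 x2 := le_max_right _ _
  rcases h with h | h
  · exact h (hall x1 y1 hx1 (by omega) (min_le_left _ _) (le_max_left _ _))
  · exact h (hall x2 y2 hx2 (by omega) (min_le_right _ _) (le_max_right _ _))

-- a fold whose steps are identities over the mapped pairs
theorem foldl_map_pair_id {α : Type} (f : Int → α × α → Int) (p : α)
    (hid : ∀ (b : Int) (q : α), f b (p, q) = b) :
    ∀ (t : List α) (b : Int), (t.map (fun q => (p, q))).foldl f b = b
  | [], b => rfl
  | q :: t, b => by
    rw [List.map_cons, List.foldl_cons, hid b q]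
    exact foldl_map_pair_id f p hid t b

-- dropping pairs whose step is the identity
theorem foldl_map_pair_filter {α : Type} (f : Int → α × α → Int) (p : α) (m : α → Bool)
    (hid : ∀ (b : Int) (q : α), m q = false → f b (p, q) = b) :
    ∀ (t : List α) (b : Int),
      (t.map (fun q => (p, q))).foldl f b = ((t.filter m).map (fun q => (p, q))).foldl f b
  | [], b => rfl
  | q :: t, b => by
    by_cases hq : m q
    · rw [List.filter_cons_of_pos hq, List.map_cons, List.map_cons, List.foldl_cons,
        List.foldl_cons]
      exact foldl_map_pair_filter f p m hid t _
    · rw [List.filter_cons_of_neg (by simpa using hq), List.map_cons, List.foldl_cons,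
        hid b q (by simpa using hq)]
      exact foldl_map_pair_filter f p m hid t b

-- A's fold over combinations(l, 2) ignores elements rejected by m
theorem foldl_comb2_filter {α : Type} (f : Int → α × α → Int) (m : α → Bool)
    (hid : ∀ (b : Int) (p q : α), m p = false ∨ m q = false → f b (p, q) = b) :
    ∀ (l : List α) (b : Int), (comb2 l).foldl f b = (comb2 (l.filter m)).foldl f b
  | [], b => rfl
  | p :: t, b => by
    rw [comb2, List.foldl_append]
    by_cases hp : m p
    · rw [List.filter_cons_of_pos hp, comb2, List.foldl_append,
        ← foldl_map_pair_filter f p m (fun b q hq => hid b p q (Or.inr hq)) t b]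
      exact foldl_comb2_filter f m hid t _
    · rw [foldl_map_pair_id f p (fun b q => hid b p q (Or.inl (by simpa using hp))) t b,
        List.filter_cons_of_neg (by simpa using hp)]
      exact foldl_comb2_filter f m hid t b

-- ===== VERDICT (by name: the statement is the Claim_ definition above) =====
theorem largest_rectangle_spec : Claim_equal_largest_rectangle := by
  intro red allowed _
  unfold Spec_largest_rectangle largest_rectangle largest_rectangle_alt
  have hid : ∀ (b : Int) (p q : Int × Int),
      (fun r => decide (r ∈ PySem.Set.ofList allowed)) p = false ∨
      (fun r => decide (r ∈ PySem.Set.ofList allowed)) q = false →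
      (fun best (pq : (Int × Int) × (Int × Int)) =>
        let x1 := pq.1.1
        let y1 := pq.1.2
        let x2 := pq.2.1
        let y2 := pq.2.2
        let minx := min x1 x2
        let maxx := max x1 x2
        let miny := min y1 y2
        let maxy := max y1 y2
        let valid := loopX allowed miny maxy (maxx + 1 - minx).toNat minx
        if valid then max b ((maxx - minx + 1) * (maxy - miny + 1)) else b) b (p, q) = b := by
    intro b p q h
    have h' : (p.1, p.2) ∉ allowed ∨ (q.1, q.2) ∉ allowed := by
      rcases h with h | h <;>
        [left; right] <;>
        · simp only [decide_eq_false_iff_not, PySem.Set.mem_ofList] at h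
          simpa using h
    exact step_id allowed b p.1 p.2 q.1 q.2 h'
  rw [foldl_comb2_filter _ (fun r => decide (r ∈ PySem.Set.ofList allowed)) hid red 0]
  exact loop_eq allowed (red.filter (fun r => decide (r ∈ PySem.Set.ofList allowed))) 0
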